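-- pv_equiv track=rewrite | github.com/SomeKindOfDuck/retinomap | src/retinomap/preset.py | sanitize_preset_name
-- ===== SOURCE A (Python) =====
-- def sanitize_preset_name(name: str) -> str:
--     name = name.strip()
--
--     if not name:
--         raise ValueError("Preset name is empty")
--
--     forbidden = '<>:"/\\|?*'
--     for char in forbidden:
--         name = name.replace(char, "_")
--
--     return name
-- ===== SOURCE B (Python) =====
-- def sanitize_preset_name(name: str) -> str:
--     name = name.strip()
--
--     if not name:
--         raise ValueError("Preset name is empty")
--
--     forbidden = set('<>:"/\\|?*')
--     return ''.join('_' if c in forbidden else c for c in name)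
-- ===== Notes on version B (the rewrite author's own statement) =====
-- stated objective: idiomatic
-- what changed: A rewrites the whole string once per forbidden character (nine sequential str.replace passes); B makes a single pass over the input characters, testing each against a set of forbidden characters and joining the result.
import Mathlib
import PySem

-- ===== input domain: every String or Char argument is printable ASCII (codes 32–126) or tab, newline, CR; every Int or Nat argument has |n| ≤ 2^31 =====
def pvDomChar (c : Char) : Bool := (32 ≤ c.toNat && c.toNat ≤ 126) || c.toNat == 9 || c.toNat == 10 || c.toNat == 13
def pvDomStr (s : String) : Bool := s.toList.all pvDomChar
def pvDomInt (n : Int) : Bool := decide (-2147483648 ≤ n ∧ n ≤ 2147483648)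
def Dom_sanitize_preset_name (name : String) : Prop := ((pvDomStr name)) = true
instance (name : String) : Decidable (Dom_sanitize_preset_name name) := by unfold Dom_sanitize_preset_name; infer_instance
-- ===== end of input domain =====

-- B replaces A's nine sequential full-string replace passes with one pass over the
-- input characters, mapping each forbidden character (membership in a set) to '_' (idiomatic).


-- ===== PORT A =====
-- name = name.strip(); for char in '<>:"/\|?*': name = name.replace(char, "_")
def sanitize_preset_name (name : String) : String :=
  let name := PySem.Str.strip name
  ['<', '>', ':', '"', '/', '\\', '|', '?', '*'].foldl
    (fun n char => PySem.Str.replace n (String.ofList [char]) "_") name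

-- ===== PORT B =====
-- forbidden = set('<>:"/\|?*'); ''.join('_' if c in forbidden else c for c in name.strip())
def pvForbidden : PySem.Set Char := PySem.Set.ofList ['<', '>', ':', '"', '/', '\\', '|', '?', '*']

def sanitize_preset_name_alt (name : String) : String :=
  let name := PySem.Str.strip name
  String.ofList (name.toList.map (fun c => if pvForbidden.contains c then '_' else c))

-- ===== PRECONDITION & SPEC =====
-- Pre_ excludes exactly the inputs (whitespace-only strings) on which A raises ValueError.
def Pre_sanitize_preset_name (name : String) : Prop := PySem.Str.strip name ≠ ""
instance (name : String) : Decidable (Pre_sanitize_preset_name name) := by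
  unfold Pre_sanitize_preset_name; infer_instance

def pvWitness_sanitize_preset_name : String := " my:pre/set? "

def Spec_sanitize_preset_name (name : String) (out : String) : Prop := out = sanitize_preset_name_alt name
instance (name : String) (out : String) : Decidable (Spec_sanitize_preset_name name out) := by unfold Spec_sanitize_preset_name; infer_instance

-- ===== CLAIM (what is proved, stated in full; the proofs are below) =====
def Claim_equal_sanitize_preset_name : Prop := ∀ (name : String), Dom_sanitize_preset_name name → Pre_sanitize_preset_name name → Spec_sanitize_preset_name name (sanitize_preset_name name)

-- ===== LEMMAS AND PROOFS =====

-- a single-character replace is a character-wise map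
theorem replace_go_single (c r : Char) (fuel : Nat) (l acc : List Char)
    (h : l.length ≤ fuel) :
    PySem.Chars.replace.go [c] [r] fuel l acc
      = acc.reverse ++ l.map (fun x => if x = c then r else x) := by
  induction fuel generalizing l acc with
  | zero =>
    interval_cases hl : l.length
    · simp [List.length_eq_zero_iff.mp hl, PySem.Chars.replace.go]
  | succ fuel ih =>
    cases l with
    | nil => simp [PySem.Chars.replace.go]
    | cons x t =>
      simp only [PySem.Chars.replace.go]
      by_cases hx : x = c
      · have : List.isPrefixOf [c] (x :: t) = true := by simp [List.isPrefixOf, hx]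
        rw [if_pos this, ih _ _ (by simpa using Nat.le_of_succ_le_succ (by simpa using h))]
        simp [hx]
      · have hp : List.isPrefixOf [c] (x :: t) = false := by
          simp [List.isPrefixOf]; exact Ne.symm hx
        rw [if_neg (by simp [hp]), ih _ _ (by simpa using Nat.le_of_succ_le_succ (by simpa using h))]
        simp [hx]

theorem replace_single (c r : Char) (s : List Char) :
    PySem.Chars.replace s [c] [r] = s.map (fun x => if x = c then r else x) := by
  rw [PySem.Chars.replace]
  simp [replace_go_single c r s.length s [] le_rfl]

-- folding single-character replaces over the forbidden list = one map with a membership test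
theorem fold_replace_eq_map (F : List Char) (s : List Char) :
    F.foldl (fun n c => PySem.Chars.replace n [c] ['_']) s
      = s.map (fun x => if F.contains x then '_' else x) := by
  induction F generalizing s with
  | nil => simp
  | cons c F ih =>
    rw [List.foldl_cons, replace_single, ih, List.map_map]
    apply List.map_congr_left
    intro x _
    by_cases hx : x = c
    · subst hx
      by_cases h' : F.contains x <;> simp [Function.comp]
    · simp [Function.comp, hx]

-- the String-level fold of A reduces to the List-level fold
theorem str_fold_toList (F : List Char) (s : String) :
    (F.foldl (fun n char => PySem.Str.replace n (String.ofList [char]) "_") s).toList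
      = F.foldl (fun n c => PySem.Chars.replace n [c] ['_']) s.toList := by
  induction F generalizing s with
  | nil => rfl
  | cons c F ih =>
    rw [List.foldl_cons, List.foldl_cons, ih, PySem.Str.toList_replace, String.toList_ofList]
    rfl

-- ===== VERDICT (by name: the statement is the Claim_ definition above) =====
theorem sanitize_preset_name_spec : Claim_equal_sanitize_preset_name := by
  intro name _ _
  unfold Spec_sanitize_preset_name sanitize_preset_name sanitize_preset_name_alt
  apply String.toList_inj.mp
  rw [str_fold_toList, fold_replace_eq_map]
  simp [pvForbidden, PySem.Set.ofList, PySem.Set.contains]
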